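-- pv_equiv track=rewrite | github.com/omeriku/Search_Engine_Python | parser_module.py | word_cutter
-- ===== SOURCE A (Python) =====
-- def word_cutter(add, url_stop, original_word):
--     word = ""
--     if original_word.isupper():
--         for c in original_word:
--             if c.isupper():
--                 word += c
--             elif c.isdigit():
--                 if word.isnumeric():
--                     word += c
--                 else:
--                     add.append(word)
--                     word = c
--     else:
--         for c in original_word:
--             if c in url_stop:
--                 add.append(word)
--                 word = ""
--                 continue
--             if c.isupper():
--                 add.append(word)
--                 word = c
--             elif c.isdigit():
--                 if word.isnumeric():
--                     word += c
--                 else: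
--                     add.append(word)
--                     word = c
--             else:
--                 word += c
--     add.append(word)
--
--     return add
-- ===== SOURCE B (Python) =====
-- def word_cutter(add, url_stop, original_word):
--     # Two staged passes instead of a stateful scan: (1) compute the cut indices
--     # from a purely local previous/current-character predicate, (2) slice the
--     # word between consecutive cuts. Appends to `add` in place, like A.
--     if original_word.isupper():
--         w = [c for c in original_word if c.isupper() or c.isdigit()]
--         stops = frozenset()
--         cuts = [i for i in range(len(w))
--                 if w[i].isdigit() and (i == 0 or not w[i - 1].isdigit())]
--     else:
--         w = list(original_word)
--         stops = frozenset(url_stop)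
--         cuts = [i for i in range(len(w))
--                 if w[i] in stops or w[i].isupper()
--                 or (w[i].isdigit()
--                     and (i == 0 or w[i - 1] in stops or not w[i - 1].isdigit()))]
--     ends = cuts + [len(w)]
--     add.append(''.join(w[0:ends[0]]))
--     for k, p in enumerate(cuts):
--         start = p + 1 if w[p] in stops else p
--         add.append(''.join(w[start:ends[k + 1]]))
--     return add
-- ===== Notes on version B (the rewrite author's own statement) =====
-- stated objective: alternative
-- what changed: Replaces A's stateful accumulator scan (growing a word buffer and rescanning it with isnumeric()) by two staged passes: first compute the list of cut indices from a purely local previous/current-character predicate, then emit every token by slicing the word between consecutive cuts.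
import Mathlib
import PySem

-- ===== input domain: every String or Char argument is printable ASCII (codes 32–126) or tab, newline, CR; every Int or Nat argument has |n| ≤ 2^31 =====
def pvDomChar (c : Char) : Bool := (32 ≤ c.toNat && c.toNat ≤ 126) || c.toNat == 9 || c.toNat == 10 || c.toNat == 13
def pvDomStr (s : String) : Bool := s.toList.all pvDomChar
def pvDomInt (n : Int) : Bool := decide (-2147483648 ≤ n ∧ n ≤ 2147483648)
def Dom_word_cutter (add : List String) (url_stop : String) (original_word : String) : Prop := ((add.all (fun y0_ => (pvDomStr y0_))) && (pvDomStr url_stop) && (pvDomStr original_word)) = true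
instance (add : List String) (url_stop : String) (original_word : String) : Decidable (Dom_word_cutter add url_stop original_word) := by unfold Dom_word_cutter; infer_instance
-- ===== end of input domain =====

-- B replaces A's stateful accumulator scan (which grows a word buffer and rescans it with
-- isnumeric()) by two staged passes: compute the cut indices from a local prev/current-char
-- predicate, then slice the word between consecutive cuts. Both Pythons also append to `add`
-- in place; the theorem is about the returned list.

-- shared helper: Python str.isupper() — at least one cased char and no lowercase; exact on the ASCII domain
def pyStrIsupper (cs : List Char) : Bool :=
  cs.any PySem.Chars.isalpha && cs.all (fun c => !PySem.Chars.islower c)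

-- ===== PORT A =====
-- loop body of A's all-uppercase branch (word kept as List Char; str.isnumeric() = strIsdigit on ASCII)
def stepAU (st : List String × List Char) (c : Char) : List String × List Char :=
  if PySem.Chars.isupper c then (st.1, st.2 ++ [c])
  else if PySem.Chars.isdigit c then
    if PySem.Chars.strIsdigit st.2 then (st.1, st.2 ++ [c])
    else (st.1 ++ [String.ofList st.2], [c])
  else st

-- loop body of A's general branch ('c in url_stop' = substring test on a 1-char string)
def stepAL (us : List Char) (st : List String × List Char) (c : Char) : List String × List Char :=
  if PySem.Chars.isIn [c] us then (st.1 ++ [String.ofList st.2], [])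
  else if PySem.Chars.isupper c then (st.1 ++ [String.ofList st.2], [c])
  else if PySem.Chars.isdigit c then
    if PySem.Chars.strIsdigit st.2 then (st.1, st.2 ++ [c])
    else (st.1 ++ [String.ofList st.2], [c])
  else (st.1, st.2 ++ [c])

def word_cutter (add : List String) (url_stop : String) (original_word : String) : List String :=
  let cs := original_word.toList
  let st :=
    if pyStrIsupper cs then cs.foldl stepAU (add, [])
    else cs.foldl (stepAL url_stop.toList) (add, [])
  st.1 ++ [String.ofList st.2]

-- ===== PORT B =====
-- Source B stage 1, upper branch: the cut-index comprehension over range(len(w));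
-- the always-in-range index w[i] is ported as getD (exact there)
def cutsUpper (w : List Char) : List Nat :=
  (List.range w.length).filter (fun i =>
    PySem.Chars.isdigit (w.getD i ' ') &&
      (i == 0 || !PySem.Chars.isdigit (w.getD (i - 1) ' ')))

-- Source B stage 1, general branch
def cutsGen (stops : PySem.Set Char) (w : List Char) : List Nat :=
  (List.range w.length).filter (fun i =>
    stops.contains (w.getD i ' ') || PySem.Chars.isupper (w.getD i ' ') ||
      (PySem.Chars.isdigit (w.getD i ' ') &&
        (i == 0 || stops.contains (w.getD (i - 1) ' ') ||
          !PySem.Chars.isdigit (w.getD (i - 1) ' '))))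

-- Source B stage 2: the loop 'for k, p in enumerate(cuts)', with ends[k+1] = next cut or len(w);
-- the nonnegative in-range slice w[start:e] is ported as drop/take (exact there)
def assembleGo (stops : PySem.Set Char) (w : List Char) : List Nat → List String
  | [] => []
  | p :: rest =>
      let e := rest.headD w.length
      let start := if stops.contains (w.getD p ' ') then p + 1 else p
      String.ofList ((w.drop start).take (e - start)) :: assembleGo stops w rest

def word_cutter_alt (add : List String) (url_stop : String) (original_word : String) : List String :=
  let isU := pyStrIsupper original_word.toList
  let w := if isU then
      original_word.toList.filter (fun c => PySem.Chars.isupper c || PySem.Chars.isdigit c)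
    else original_word.toList
  let stops := if isU then PySem.Set.ofList [] else PySem.Set.ofList url_stop.toList
  let cuts := if isU then cutsUpper w else cutsGen stops w
  add ++ (String.ofList (w.take (cuts.headD w.length)) :: assembleGo stops w cuts)

-- ===== PRECONDITION & SPEC =====
def Spec_word_cutter (add : List String) (url_stop : String) (original_word : String) (out : List String) : Prop := out = word_cutter_alt add url_stop original_word
instance (add : List String) (url_stop : String) (original_word : String) (out : List String) : Decidable (Spec_word_cutter add url_stop original_word out) := by unfold Spec_word_cutter; infer_instance

-- ===== CLAIM (what is proved, stated in full; the proofs are below) =====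
def Claim_equal_word_cutter : Prop := ∀ (add : List String) (url_stop : String) (original_word : String), Dom_word_cutter add url_stop original_word → Spec_word_cutter add url_stop original_word (word_cutter add url_stop original_word)

-- ===== LEMMAS AND PROOFS =====

-- proof-side mid-level spec: recursion with the previous character as the state

-- the digit-run flag as a function of the previous character
def flagOf (stops : PySem.Set Char) : Option Char → Bool
  | none => false
  | some p => PySem.Chars.isdigit p && !stops.contains p

def pairCut (stops : PySem.Set Char) (prev : Option Char) (c : Char) : Bool :=
  stops.contains c || PySem.Chars.isupper c ||
    (PySem.Chars.isdigit c && !flagOf stops prev)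

def idxCuts (stops : PySem.Set Char) (prev : Option Char) (cs : List Char) : List Nat :=
  (List.range cs.length).filter (fun i =>
    pairCut stops (if i = 0 then prev else some (cs.getD (i - 1) ' ')) (cs.getD i ' '))

def tokensPrev (stops : PySem.Set Char) : List Char → Option Char → List Char → List String
  | buf, _, [] => [String.ofList buf]
  | buf, prev, c :: cs =>
    if stops.contains c then String.ofList buf :: tokensPrev stops [] (some c) cs
    else if PySem.Chars.isupper c then String.ofList buf :: tokensPrev stops [c] (some c) cs
    else if PySem.Chars.isdigit c then
      if flagOf stops prev then tokensPrev stops (buf ++ [c]) (some c) cs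
      else String.ofList buf :: tokensPrev stops [c] (some c) cs
    else tokensPrev stops (buf ++ [c]) (some c) cs

-- upper-mode variants (on the filtered sequence; stops never fire)
def flagU : Option Char → Bool
  | none => false
  | some p => PySem.Chars.isdigit p

def pairCutU (prev : Option Char) (c : Char) : Bool :=
  PySem.Chars.isdigit c && !flagU prev

def idxCutsU (prev : Option Char) (cs : List Char) : List Nat :=
  (List.range cs.length).filter (fun i =>
    pairCutU (if i = 0 then prev else some (cs.getD (i - 1) ' ')) (cs.getD i ' '))

def tokensPrevU : List Char → Option Char → List Char → List String
  | buf, _, [] => [String.ofList buf]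
  | buf, prev, c :: cs =>
    if PySem.Chars.isdigit c then
      if flagU prev then tokensPrevU (buf ++ [c]) (some c) cs
      else String.ofList buf :: tokensPrevU [c] (some c) cs
    else tokensPrevU (buf ++ [c]) (some c) cs

lemma strIsdigit_append_singleton (buf : List Char) (c : Char) :
    PySem.Chars.strIsdigit (buf ++ [c]) = (buf.all PySem.Chars.isdigit && PySem.Chars.isdigit c) := by
  simp [PySem.Chars.strIsdigit]

lemma all_isdigit_of_strIsdigit {buf : List Char} (h : PySem.Chars.strIsdigit buf = true) :
    buf.all PySem.Chars.isdigit = true := by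
  simp only [PySem.Chars.strIsdigit, Bool.and_eq_true] at h
  exact h.2

lemma not_isdigit_of_isupper {c : Char} (h : PySem.Chars.isupper c = true) :
    PySem.Chars.isdigit c = false := by
  simp only [PySem.Chars.isupper, Bool.and_eq_true, decide_eq_true_eq] at h
  cases hd : PySem.Chars.isdigit c with
  | false => rfl
  | true =>
    simp only [PySem.Chars.isdigit, Bool.and_eq_true, decide_eq_true_eq] at hd
    exact absurd (le_trans h.1 hd.2) (by decide)

-- membership in frozenset(url_stop) is the same test as Python's 'c in url_stop' on a 1-char needle
lemma contains_ofList_eq_isIn (us : List Char) (c : Char) :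
    (PySem.Set.ofList us).contains c = PySem.Chars.isIn [c] us := by
  by_cases h : c ∈ us
  · have h1 : (PySem.Set.ofList us).contains c = true :=
      (PySem.Set.contains_iff (PySem.Set.ofList us) c).mpr ((PySem.Set.mem_ofList us c).mpr h)
    have h2 : PySem.Chars.isIn [c] us = true :=
      (PySem.Chars.isIn_iff_infix [c] us).mpr ((List.singleton_infix_iff c us).mpr h)
    rw [h1, h2]
  · have h1 : (PySem.Set.ofList us).contains c = false := by
      cases hb : (PySem.Set.ofList us).contains c with
      | false => rfl
      | true =>
        exact absurd ((PySem.Set.mem_ofList us c).mp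
          ((PySem.Set.contains_iff (PySem.Set.ofList us) c).mp hb)) h
    have h2 : PySem.Chars.isIn [c] us = false := by
      rw [PySem.Chars.isIn_eq_false_iff]
      exact fun hin => h ((List.singleton_infix_iff c us).mp hin)
    rw [h1, h2]

-- ---- stage-1 bridge: the index comprehensions equal the prev-char recursions ----

lemma strIsdigit_nil : PySem.Chars.strIsdigit [] = false := by
  simp [PySem.Chars.strIsdigit]

lemma contains_false_of_not_mem {stops : PySem.Set Char} {c : Char} (h : c ∉ stops) :
    stops.contains c = false := by
  cases hb : stops.contains c with
  | false => rfl
  | true => exact absurd ((PySem.Set.contains_iff stops c).mp hb) h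

lemma cutsGen_eq_idxCuts (stops : PySem.Set Char) (w : List Char) :
    cutsGen stops w = idxCuts stops none w := by
  unfold cutsGen idxCuts
  apply List.filter_congr
  intro i _
  cases i with
  | zero => simp [pairCut, flagOf]
  | succ j => simp [pairCut, flagOf, Bool.or_comm]

lemma cutsUpper_eq_idxCutsU (w : List Char) :
    cutsUpper w = idxCutsU none w := by
  unfold cutsUpper idxCutsU
  apply List.filter_congr
  intro i _
  cases i with
  | zero => simp [pairCutU, flagU]
  | succ j => simp [pairCutU, flagU]

lemma idxCuts_cons (stops : PySem.Set Char) (prev : Option Char) (c : Char) (cs : List Char) :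
    idxCuts stops prev (c :: cs)
      = (if pairCut stops prev c then [0] else []) ++ (idxCuts stops (some c) cs).map (· + 1) := by
  unfold idxCuts
  rw [List.length_cons, List.range_succ_eq_map, List.filter_cons, List.filter_map]
  have hfun : ((fun i => pairCut stops (if i = 0 then prev else some ((c :: cs).getD (i - 1) ' '))
      ((c :: cs).getD i ' ')) ∘ Nat.succ)
      = (fun i => pairCut stops (if i = 0 then some c else some (cs.getD (i - 1) ' '))
          (cs.getD i ' ')) := by
    funext i
    cases i with
    | zero => simp
    | succ j => simp
  rw [hfun]
  by_cases h : pairCut stops prev c = true <;> simp [h]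

lemma idxCutsU_cons (prev : Option Char) (c : Char) (cs : List Char) :
    idxCutsU prev (c :: cs)
      = (if pairCutU prev c then [0] else []) ++ (idxCutsU (some c) cs).map (· + 1) := by
  unfold idxCutsU
  rw [List.length_cons, List.range_succ_eq_map, List.filter_cons, List.filter_map]
  have hfun : ((fun i => pairCutU (if i = 0 then prev else some ((c :: cs).getD (i - 1) ' '))
      ((c :: cs).getD i ' ')) ∘ Nat.succ)
      = (fun i => pairCutU (if i = 0 then some c else some (cs.getD (i - 1) ' '))
          (cs.getD i ' ')) := by
    funext i
    cases i with
    | zero => simp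
    | succ j => simp
  rw [hfun]
  by_cases h : pairCutU prev c = true <;> simp [h]

-- ---- stage-2 bridge: shifting all cut indices by one drops the head character ----

lemma assembleGo_shift (stops : PySem.Set Char) (c : Char) (cs : List Char) (l : List Nat) :
    assembleGo stops (c :: cs) (l.map (· + 1)) = assembleGo stops cs l := by
  induction l with
  | nil => rfl
  | cons p rest ih =>
    simp only [List.map_cons, assembleGo]
    have he : ((rest.map (· + 1)).headD (c :: cs).length) = rest.headD cs.length + 1 := by
      cases rest <;> simp
    have hg : (c :: cs).getD (p + 1) ' ' = cs.getD p ' ' := by simp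
    rw [he, hg, ih]
    congr 1
    by_cases h : cs.getD p ' ' ∈ stops
    · simp only [(PySem.Set.contains_iff stops _).mpr h, if_true]
      rw [List.drop_succ_cons]
      have harith : rest.headD cs.length + 1 - (p + 1 + 1) = rest.headD cs.length - (p + 1) := by
        omega
      rw [harith]
    · simp only [contains_false_of_not_mem h, Bool.false_eq_true, if_neg, not_false_iff]
      rw [List.drop_succ_cons]
      have harith : rest.headD cs.length + 1 - (p + 1) = rest.headD cs.length - p := by
        omega
      rw [harith]

-- ---- B's assembly equals the prev-char recursion ----

lemma assemble_eq_tokensPrev (stops : PySem.Set Char) :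
    ∀ (cs : List Char) (prev : Option Char) (buf : List Char),
      String.ofList (buf ++ cs.take ((idxCuts stops prev cs).headD cs.length))
          :: assembleGo stops cs (idxCuts stops prev cs)
        = tokensPrev stops buf prev cs := by
  intro cs
  induction cs with
  | nil => intro prev buf; simp [idxCuts, tokensPrev, assembleGo]
  | cons c cs ih =>
    intro prev buf
    rw [idxCuts_cons]
    have hhead : ∀ (l : List Nat),
        ((l.map (· + 1)).headD (c :: cs).length) = l.headD cs.length + 1 := by
      intro l; cases l <;> simp
    by_cases hcut : pairCut stops prev c = true
    · simp only [hcut, if_true, List.singleton_append, List.headD_cons, List.take_zero,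
        List.append_nil]
      by_cases hc : c ∈ stops
      · have hrhs : tokensPrev stops buf prev (c :: cs)
            = String.ofList buf :: tokensPrev stops [] (some c) cs := by
          rw [tokensPrev]; simp [hc]
        rw [hrhs]
        congr 1
        simpa [assembleGo, assembleGo_shift, hhead, hc,
          (PySem.Set.contains_iff stops c).mpr hc] using ih (some c) []
      · have hrhs : tokensPrev stops buf prev (c :: cs)
            = String.ofList buf :: tokensPrev stops [c] (some c) cs := by
          have hcut2 : (PySem.Chars.isupper c
              || (PySem.Chars.isdigit c && !flagOf stops prev)) = true := by
            have := hcut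
            simp [pairCut, hc] at this
            rcases this with h | ⟨h1, h2⟩
            · simp [h]
            · simp [h1, h2]
          rw [tokensPrev]
          by_cases hu : PySem.Chars.isupper c = true
          · simp [hc, hu]
          · rw [Bool.or_eq_true] at hcut2
            rcases hcut2 with h | h
            · exact absurd h hu
            · rw [Bool.and_eq_true] at h
              have hf : flagOf stops prev = false := by simpa using h.2
              simp [hc, hu, h.1, hf]
        rw [hrhs]
        congr 1
        simpa [assembleGo, assembleGo_shift, hhead, hc,
          contains_false_of_not_mem hc] using ih (some c) [c]
    · rw [if_neg hcut]
      simp only [List.nil_append]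
      rw [hhead, assembleGo_shift]
      have hc : c ∉ stops := fun h => hcut (by simp [pairCut, h])
      have hu : PySem.Chars.isupper c = false := by
        cases h : PySem.Chars.isupper c with
        | false => rfl
        | true => exact absurd (by simp [pairCut, h]) hcut
      have htake : (c :: cs).take (((idxCuts stops (some c) cs).headD cs.length) + 1)
          = c :: cs.take ((idxCuts stops (some c) cs).headD cs.length) :=
        List.take_succ_cons
      rw [htake]
      have hlhs : buf ++ c :: cs.take ((idxCuts stops (some c) cs).headD cs.length)
          = (buf ++ [c]) ++ cs.take ((idxCuts stops (some c) cs).headD cs.length) := by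
        simp
      rw [hlhs, ih (some c) (buf ++ [c])]
      by_cases hd : PySem.Chars.isdigit c = true
      · have hf : flagOf stops prev = true := by
          cases h : flagOf stops prev with
          | true => rfl
          | false => exact absurd (by simp [pairCut, hc, hu, hd, h]) hcut
        simp [tokensPrev, hc, hu, hd, hf]
      · simp [tokensPrev, hc, hu, hd]

lemma contains_empty_set (c : Char) : (PySem.Set.ofList ([] : List Char)).contains c = false := by
  apply contains_false_of_not_mem
  intro h
  have := (PySem.Set.mem_ofList [] c).mp h
  simp at this

lemma assembleU_eq_tokensPrevU :
    ∀ (cs : List Char) (prev : Option Char) (buf : List Char),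
      String.ofList (buf ++ cs.take ((idxCutsU prev cs).headD cs.length))
          :: assembleGo (PySem.Set.ofList []) cs (idxCutsU prev cs)
        = tokensPrevU buf prev cs := by
  intro cs
  induction cs with
  | nil => intro prev buf; simp [idxCutsU, tokensPrevU, assembleGo]
  | cons c cs ih =>
    intro prev buf
    rw [idxCutsU_cons]
    have hhead : ∀ (l : List Nat),
        ((l.map (· + 1)).headD (c :: cs).length) = l.headD cs.length + 1 := by
      intro l; cases l <;> simp
    by_cases hcut : pairCutU prev c = true
    · simp only [hcut, if_true, List.singleton_append, List.headD_cons, List.take_zero,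
        List.append_nil]
      have hcut2 := hcut
      simp only [pairCutU, Bool.and_eq_true] at hcut2
      have hf : flagU prev = false := by simpa using hcut2.2
      have hrhs : tokensPrevU buf prev (c :: cs)
          = String.ofList buf :: tokensPrevU [c] (some c) cs := by
        rw [tokensPrevU]
        simp [hcut2.1, hf]
      rw [hrhs]
      congr 1
      simpa [assembleGo, assembleGo_shift, hhead, contains_empty_set] using ih (some c) [c]
    · rw [if_neg hcut]
      simp only [List.nil_append]
      rw [hhead, assembleGo_shift]
      have htake : (c :: cs).take (((idxCutsU (some c) cs).headD cs.length) + 1)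
          = c :: cs.take ((idxCutsU (some c) cs).headD cs.length) :=
        List.take_succ_cons
      rw [htake]
      have hlhs : buf ++ c :: cs.take ((idxCutsU (some c) cs).headD cs.length)
          = (buf ++ [c]) ++ cs.take ((idxCutsU (some c) cs).headD cs.length) := by
        simp
      rw [hlhs, ih (some c) (buf ++ [c])]
      by_cases hd : PySem.Chars.isdigit c = true
      · have hf : flagU prev = true := by
          cases h : flagU prev with
          | true => rfl
          | false => exact absurd (by simp [pairCutU, hd, h]) hcut
        simp [tokensPrevU, hd, hf]
      · simp [tokensPrevU, hd]

-- ---- A's folds equal the prev-char recursions ----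

lemma foldAL_eq_tokensPrev (us : List Char) (stops : PySem.Set Char)
    (hs : ∀ c, stops.contains c = PySem.Chars.isIn [c] us) :
    ∀ (cs : List Char) (add : List String) (buf : List Char) (prev : Option Char),
      PySem.Chars.strIsdigit buf = flagOf stops prev →
      (cs.foldl (stepAL us) (add, buf)).1 ++ [String.ofList (cs.foldl (stepAL us) (add, buf)).2]
        = add ++ tokensPrev stops buf prev cs := by
  intro cs
  induction cs with
  | nil => intro add buf prev _; simp [tokensPrev]
  | cons c cs ih =>
    intro add buf prev hinv
    rw [List.foldl_cons]
    by_cases hc : c ∈ stops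
    · have hct : stops.contains c = true := (PySem.Set.contains_iff stops c).mpr hc
      have hin : PySem.Chars.isIn [c] us = true := by rw [← hs]; exact hct
      have e : stepAL us (add, buf) c = (add ++ [String.ofList buf], []) := by
        simp [stepAL, hin]
      rw [e, ih (add ++ [String.ofList buf]) [] (some c)
        (by rw [strIsdigit_nil]; simp [flagOf, hc])]
      simp [tokensPrev, hc]
    · have hcf : stops.contains c = false := contains_false_of_not_mem hc
      have hin : PySem.Chars.isIn [c] us = false := by rw [← hs]; exact hcf
      by_cases hu : PySem.Chars.isupper c = true
      · have e : stepAL us (add, buf) c = (add ++ [String.ofList buf], [c]) := by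
          simp [stepAL, hin, hu]
        rw [e, ih (add ++ [String.ofList buf]) [c] (some c)
          (by simp [PySem.Chars.strIsdigit, flagOf, not_isdigit_of_isupper hu])]
        simp [tokensPrev, hc, hu]
      · by_cases hd : PySem.Chars.isdigit c = true
        · cases hn : PySem.Chars.strIsdigit buf with
          | true =>
            have hf : flagOf stops prev = true := by rw [← hinv]; exact hn
            have e : stepAL us (add, buf) c = (add, buf ++ [c]) := by
              simp [stepAL, hin, hu, hd, hn]
            rw [e, ih add (buf ++ [c]) (some c)
              (by rw [strIsdigit_append_singleton, all_isdigit_of_strIsdigit hn, hd]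
                  simp [flagOf, hd, hc])]
            simp [tokensPrev, hc, hu, hd, hf]
          | false =>
            have hf : flagOf stops prev = false := by rw [← hinv]; exact hn
            have e : stepAL us (add, buf) c = (add ++ [String.ofList buf], [c]) := by
              simp [stepAL, hin, hu, hd, hn]
            rw [e, ih (add ++ [String.ofList buf]) [c] (some c)
              (by simp [PySem.Chars.strIsdigit, flagOf, hd, hc])]
            simp [tokensPrev, hc, hu, hd, hf]
        · have e : stepAL us (add, buf) c = (add, buf ++ [c]) := by
            simp [stepAL, hin, hu, hd]
          have hdf : PySem.Chars.isdigit c = false := by simpa using hd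
          rw [e, ih add (buf ++ [c]) (some c)
            (by rw [strIsdigit_append_singleton, hdf]; simp [flagOf, hdf])]
          simp [tokensPrev, hc, hu, hd]

lemma foldAU_eq_tokensPrevU :
    ∀ (cs : List Char) (add : List String) (buf : List Char) (prev : Option Char),
      PySem.Chars.strIsdigit buf = flagU prev →
      (cs.foldl stepAU (add, buf)).1 ++ [String.ofList (cs.foldl stepAU (add, buf)).2]
        = add ++ tokensPrevU buf prev
            (cs.filter (fun c => PySem.Chars.isupper c || PySem.Chars.isdigit c)) := by
  intro cs
  induction cs with
  | nil => intro add buf prev _; simp [tokensPrevU]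
  | cons c cs ih =>
    intro add buf prev hinv
    rw [List.foldl_cons, List.filter_cons]
    by_cases hu : PySem.Chars.isupper c = true
    · have hd := not_isdigit_of_isupper hu
      have e : stepAU (add, buf) c = (add, buf ++ [c]) := by simp [stepAU, hu]
      rw [e, ih add (buf ++ [c]) (some c)
        (by rw [strIsdigit_append_singleton, hd]; simp [flagU, hd])]
      simp [hu, tokensPrevU, hd]
    · by_cases hd : PySem.Chars.isdigit c = true
      · cases hn : PySem.Chars.strIsdigit buf with
        | true =>
          have hf : flagU prev = true := by rw [← hinv]; exact hn
          have e : stepAU (add, buf) c = (add, buf ++ [c]) := by simp [stepAU, hu, hd, hn]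
          rw [e, ih add (buf ++ [c]) (some c)
            (by rw [strIsdigit_append_singleton, all_isdigit_of_strIsdigit hn, hd]
                simp [flagU, hd])]
          simp [hu, hd, tokensPrevU, hf]
        | false =>
          have hf : flagU prev = false := by rw [← hinv]; exact hn
          have e : stepAU (add, buf) c = (add ++ [String.ofList buf], [c]) := by
            simp [stepAU, hu, hd, hn]
          rw [e, ih (add ++ [String.ofList buf]) [c] (some c)
            (by simp [PySem.Chars.strIsdigit, flagU, hd])]
          simp [hu, hd, tokensPrevU, hf]
      · have e : stepAU (add, buf) c = (add, buf) := by simp [stepAU, hu, hd]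
        rw [e, ih add buf prev hinv]
        simp [hu, hd]

-- ===== VERDICT (by name: the statement is the Claim_ definition above) =====
theorem word_cutter_spec : Claim_equal_word_cutter := by
  intro add url_stop original_word _
  unfold Spec_word_cutter word_cutter word_cutter_alt
  cases h : pyStrIsupper original_word.toList with
  | true =>
    simp only [h, if_pos]
    rw [foldAU_eq_tokensPrevU original_word.toList add [] none rfl,
        cutsUpper_eq_idxCutsU,
        ← assembleU_eq_tokensPrevU _ none []]
    simp
  | false =>
    simp only [h, Bool.false_eq_true, if_neg, not_false_iff]
    rw [foldAL_eq_tokensPrev url_stop.toList (PySem.Set.ofList url_stop.toList)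
          (fun c => contains_ofList_eq_isIn url_stop.toList c)
          original_word.toList add [] none rfl,
        cutsGen_eq_idxCuts,
        ← assemble_eq_tokensPrev _ original_word.toList none []]
    simp
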